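-- pv_equiv track=rewrite | github.com/ps605/UCSF_OrthoCAP | Kinematic_Score_Template.py | kdi_by_patient
-- ===== SOURCE A (Python) =====
-- def kdi_by_patient(total_kdi):
--     kdi_by_patient = {}  # Dictionary to store KDI scores by patient_ID_activity#
--
--     for patient_id, kdi_score in total_kdi:
--         # Extract the patient ID before '_activity'
--         patient_id_activity = patient_id.split('_activity')[0]
--
--         if patient_id_activity not in kdi_by_patient:
--             # Create a new entry for this patient ID
--             kdi_by_patient[patient_id_activity] = []
--
--         # Append the KDI score for this patient ID
--         kdi_by_patient[patient_id_activity].append(kdi_score)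
--
--     return kdi_by_patient
-- ===== SOURCE B (Python) =====
-- def kdi_by_patient(total_kdi):
--     key = lambda pid: pid.split('_activity')[0]
--     keys = list(dict.fromkeys(key(pid) for pid, _ in total_kdi))
--     return {k: [s for pid, s in total_kdi if key(pid) == k] for k in keys}
-- ===== Notes on version B (the rewrite author's own statement) =====
-- stated objective: alternative
-- what changed: Replaces the incremental dict-of-lists append loop by two declarative passes: dedup the patient keys in first-occurrence order, then build each group with one filter comprehension over the input.
import Mathlib
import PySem

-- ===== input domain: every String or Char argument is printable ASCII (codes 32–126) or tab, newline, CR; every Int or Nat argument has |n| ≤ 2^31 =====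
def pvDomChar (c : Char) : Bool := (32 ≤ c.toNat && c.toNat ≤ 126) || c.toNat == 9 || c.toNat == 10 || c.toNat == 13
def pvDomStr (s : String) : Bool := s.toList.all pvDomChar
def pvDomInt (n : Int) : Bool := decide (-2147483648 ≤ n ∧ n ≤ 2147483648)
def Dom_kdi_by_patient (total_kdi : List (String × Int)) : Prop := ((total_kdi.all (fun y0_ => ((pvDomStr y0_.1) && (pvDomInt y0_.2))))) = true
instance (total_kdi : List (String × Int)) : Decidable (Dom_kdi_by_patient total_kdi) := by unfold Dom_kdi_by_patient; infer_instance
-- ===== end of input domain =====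

-- B replaces A's incremental dict-of-lists append loop by a dedup of the keys plus one filter pass per key (alternative decomposition, same return value).

-- shared helper: pid.split('_activity')[0]  (split? with a nonempty separator always
-- returns some nonempty list, so the [0] indexing never raises; headD is exact here)
def kdi_key (s : String) : String :=
  ((PySem.Str.split? s "_activity").getD []).headD ""

-- ===== PORT A =====
def kdi_by_patient (total_kdi : List (String × Int)) : List (String × List Int) :=
  (total_kdi.foldl (fun d p =>
      let k := kdi_key p.1
      let d := if d.contains k then d else d.insert k ([] : List Int)
      d.modify k [] (fun l => l ++ [p.2]))
    (PySem.Dict.empty : PySem.Dict String (List Int))).items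

-- ===== PORT B =====
def kdi_by_patient_alt (total_kdi : List (String × Int)) : List (String × List Int) :=
  let keys := PySem.List.dedup (total_kdi.map (fun p => kdi_key p.1))
  keys.map (fun k => (k, (total_kdi.filter (fun p => kdi_key p.1 == k)).map (·.2)))

-- ===== PRECONDITION & SPEC =====
def Spec_kdi_by_patient (total_kdi : List (String × Int)) (out : List (String × List Int)) : Prop := out = kdi_by_patient_alt total_kdi
instance (total_kdi : List (String × Int)) (out : List (String × List Int)) : Decidable (Spec_kdi_by_patient total_kdi out) := by unfold Spec_kdi_by_patient; infer_instance

-- ===== CLAIM (what is proved, stated in full; the proofs are below) =====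
def Claim_equal_kdi_by_patient : Prop := ∀ (total_kdi : List (String × Int)), Dom_kdi_by_patient total_kdi → Spec_kdi_by_patient total_kdi (kdi_by_patient total_kdi)

-- ===== LEMMAS AND PROOFS =====

-- A's "if absent insert []; then append" step is the modify-with-default step
theorem kdi_step_eq (d : PySem.Dict String (List Int)) (k : String) (s : Int) :
    (if d.contains k then d else d.insert k ([] : List Int)).modify k [] (fun l => l ++ [s])
      = d.modify k [] (fun l => l ++ [s]) := by
  by_cases h : d.contains k = true
  · simp [h]
  · have h' : d.contains k = false := by simpa using h
    simp [h, PySem.Dict.modify, PySem.Dict.getD_insert_self,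
      PySem.Dict.insert_insert_self]
    rw [PySem.Dict.getD_of_not_contains (h := h'), List.nil_append]

theorem kdi_fold_eq (total_kdi : List (String × Int)) :
    (total_kdi.foldl (fun d p =>
        let k := kdi_key p.1
        let d := if d.contains k then d else d.insert k ([] : List Int)
        d.modify k [] (fun l => l ++ [p.2]))
      (PySem.Dict.empty : PySem.Dict String (List Int)))
    = (total_kdi.map (fun p => (kdi_key p.1, p.2))).foldl
        (fun d p => d.modify p.1 [] (fun l => l ++ [p.2])) PySem.Dict.empty := by
  rw [List.foldl_map]
  exact PySem.List.foldl_congr_mem total_kdi _ _ _ (fun d p _ => kdi_step_eq d (kdi_key p.1) p.2)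

-- ===== VERDICT (by name: the statement is the Claim_ definition above) =====
theorem kdi_by_patient_spec : Claim_equal_kdi_by_patient := by
  intro total_kdi _
  unfold Spec_kdi_by_patient kdi_by_patient kdi_by_patient_alt
  rw [kdi_fold_eq]
  set l := total_kdi.map (fun p => (kdi_key p.1, p.2)) with hl
  have hkeys : (l.foldl (fun d p => d.modify p.1 [] (fun v => v ++ [p.2]))
      (PySem.Dict.empty : PySem.Dict String (List Int))).keys
      = PySem.List.dedup (total_kdi.map (fun p => kdi_key p.1)) := by
    rw [PySem.Dict.keys_foldl_modify_key]
    simp [hl, PySem.Dict.keys_empty, PySem.Set.update, PySem.Set.ofList,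
      PySem.List.dedup_eq_ofList, Function.comp_def]
  have hnd : (l.foldl (fun d p => d.modify p.1 [] (fun v => v ++ [p.2]))
      (PySem.Dict.empty : PySem.Dict String (List Int))).keys.Nodup := by
    exact PySem.Dict.nodup_keys_foldl_modify_key _ _ _ _ _ PySem.Dict.nodup_keys_empty
  rw [PySem.Dict.items_eq_map_keys _ hnd ([] : List Int), hkeys]
  refine List.map_congr_left (fun k hk => ?_)
  rw [PySem.Dict.getD_foldl_modify_append]
  simp [hl, List.filter_map, Function.comp_def]
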